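-- pv_equiv track=rewrite | github.com/Zjlong-1/2024fall-cs101 | Previous practices/1115取石子.py | solve
-- ===== SOURCE A (Python) =====
-- def solve(a,b):
--     a,b=min(a,b),max(a,b)
--     if b%a==0:
--         return True
--     k=b//a
--     for i in range(1,k+1):
--         if  not solve(a,b-a*i):
--             return True
--     return False
-- ===== SOURCE B (Python) =====
-- def solve(a, b):
--     # Iterative normal-play evaluation of Euclid's game, O(log min(a,b)) on
--     # positive piles instead of A's exponential game-tree recursion:
--     # the current player wins at once if the larger pile is a multiple of the
--     # smaller or the floor ratio is >= 2; with exactly one legal move the move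
--     # is forced and the turn flips; with no legal move the current player loses.
--     a, b = min(a, b), max(a, b)
--     win = True
--     while True:
--         if b % a == 0:
--             return win
--         k = b // a
--         if k >= 2:
--             return win
--         if k < 1:
--             return not win
--         a, b = b - a, a
--         win = not win
-- ===== Notes on version B (the rewrite author's own statement) =====
-- stated objective: faster
-- what changed: Replaces A's exponential game-tree recursion over all k multiples with an iterative Euclidean-style normal-play evaluation: win at once if b % a == 0 or b // a >= 2, flip the turn on the single forced move, lose when no move exists.
import Mathlib
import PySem

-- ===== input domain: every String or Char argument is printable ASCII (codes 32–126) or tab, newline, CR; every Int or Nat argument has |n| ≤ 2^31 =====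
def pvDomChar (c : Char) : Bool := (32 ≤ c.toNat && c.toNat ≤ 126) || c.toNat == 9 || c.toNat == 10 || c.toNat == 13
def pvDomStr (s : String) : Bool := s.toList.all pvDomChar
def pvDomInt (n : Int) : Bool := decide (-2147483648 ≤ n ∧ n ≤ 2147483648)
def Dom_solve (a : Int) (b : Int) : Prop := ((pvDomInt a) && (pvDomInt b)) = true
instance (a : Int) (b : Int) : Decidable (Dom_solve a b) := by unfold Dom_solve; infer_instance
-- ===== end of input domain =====

-- B replaces A's exponential game-tree recursion with an iterative Euclidean-style
-- normal-play evaluation (win iff b % a == 0 or b // a >= 2; one forced move flips the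
-- turn; no move loses). Pre_ excludes only min(a,b) = 0, where A raises ZeroDivisionError.

-- ===== PORT A =====
-- termination helpers for the port (cited in decreasing_by)
theorem pvA_pos_of_guard (a b : Int) (hab : a ≤ b) (hm : PySem.Int.mod b a ≠ 0)
    (h1 : 1 ≤ PySem.Int.floordiv b a) : 0 < a := by
  rcases lt_trichotomy a 0 with ha | ha | ha
  · exfalso
    have hb := PySem.Int.floordiv_mul_add_mod b a
    have hbd := PySem.Int.mod_neg_bounds b ha
    have ht : (PySem.Int.floordiv b a - 1) * a ≤ 0 :=
      mul_nonpos_of_nonneg_of_nonpos (by omega) (le_of_lt ha)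
    have hmod0 : PySem.Int.mod b a = 0 := by
      have hexp : b = a + (PySem.Int.floordiv b a - 1) * a + PySem.Int.mod b a := by
        ring_nf; linarith [hb]
      omega
    exact hm hmod0
  · subst ha
    have h0 : PySem.Int.floordiv b 0 = 0 := by
      rw [show PySem.Int.floordiv b 0 = Int.fdiv b 0 from rfl, Int.fdiv_zero]
    omega
  · exact ha

theorem pvA_sub_lt (a b : Int) (i : Int) (ha : 0 < a) (h1 : 1 ≤ i)
    (hk : i ≤ PySem.Int.floordiv b a) :
    (a + (b - a * i)).toNat < (a + b).toNat := by
  have hb := PySem.Int.floordiv_mul_add_mod b a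
  have hm0 : 0 ≤ PySem.Int.mod b a := PySem.Int.mod_nonneg b ha
  have h2 : 0 ≤ a * (PySem.Int.floordiv b a - i) := mul_nonneg (le_of_lt ha) (by omega)
  have h3 : 0 < a * i := mul_pos ha (by omega)
  have h5 : 0 ≤ b - a * i := by nlinarith
  omega

mutual
-- literal port of A: normalize to (min, max); b % a == 0 → True; else loop i = 1..k
-- (k = b // a is constant through the loop; the port re-reads it in the guard; the loop
--  counter is j = i - 1; the proof arguments hab/hm only carry termination facts)
def solve (a : Int) (b : Int) : Bool :=
  let a' := min a b
  let b' := max a b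
  if h : PySem.Int.mod b' a' = 0 then true
  else solveLoopA a' b' 0 min_le_max h
termination_by ((a + b).toNat, 1, 0)
decreasing_by
  have hmm : min a b + max a b = a + b := min_add_max a b
  rw [hmm]
  exact Prod.Lex.right _ (Prod.Lex.left _ _ (by omega))

def solveLoopA (a : Int) (b : Int) (j : Nat) (hab : a ≤ b) (hm : PySem.Int.mod b a ≠ 0) : Bool :=
  if hj : ((j : Int) + 1) ≤ PySem.Int.floordiv b a then
    if ! solve a (b - a * ((j : Int) + 1)) then true
    else solveLoopA a b (j + 1) hab hm
  else false
termination_by ((a + b).toNat, 0, (PySem.Int.floordiv b a + 1 - (j : Int)).toNat)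
decreasing_by
  · have ha : 0 < a := pvA_pos_of_guard a b hab hm (by omega)
    exact Prod.Lex.left _ _ (pvA_sub_lt a b _ ha (by omega) hj)
  · exact Prod.Lex.right _ (Prod.Lex.right _ (by omega))
end

-- ===== PORT B =====
-- termination helper for the port (cited in the recursive call / decreasing_by)
theorem pvB_forced (a b : Int) (hab : a ≤ b) (hm : PySem.Int.mod b a ≠ 0)
    (h2 : ¬ 2 ≤ PySem.Int.floordiv b a) (h1 : ¬ PySem.Int.floordiv b a < 1) :
    b - a ≤ a := by
  have hk1 : (1 : Int) ≤ PySem.Int.floordiv b a := by omega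
  have ha : 0 < a := pvA_pos_of_guard a b hab hm hk1
  have := (PySem.Int.floordiv_lt_iff_lt_mul (a := b) (q := 2) ha).mp (by omega)
  omega

-- literal port of B's while-loop: state (a, b, win); b % a == 0 or k ≥ 2 → win;
-- k < 1 (no legal move) → not win; else the forced move flips the turn
-- (the proof argument hab only carries a termination fact)
def solveAltGo (a : Int) (b : Int) (win : Bool) (hab : a ≤ b) : Bool :=
  if hm : PySem.Int.mod b a = 0 then win
  else if h2 : 2 ≤ PySem.Int.floordiv b a then win
  else if h1 : PySem.Int.floordiv b a < 1 then ! win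
  else solveAltGo (b - a) a (! win) (pvB_forced a b hab hm h2 h1)
termination_by (a + b).toNat
decreasing_by
  have hk1 : (1 : Int) ≤ PySem.Int.floordiv b a := by omega
  have ha : 0 < a := pvA_pos_of_guard a b hab hm hk1
  omega

def solve_alt (a : Int) (b : Int) : Bool :=
  solveAltGo (min a b) (max a b) true min_le_max

-- ===== PRECONDITION & SPEC =====
-- A raises ZeroDivisionError exactly when min(a,b) = 0 (b % a with a = 0); Pre_ excludes
-- precisely those inputs and nothing else.
def Pre_solve (a : Int) (b : Int) : Prop := min a b ≠ 0
instance (a : Int) (b : Int) : Decidable (Pre_solve a b) := by unfold Pre_solve; infer_instance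
def pvWitness_solve : Int × Int := (3, 5)

def Spec_solve (a : Int) (b : Int) (out : Bool) : Prop := out = solve_alt a b
instance (a : Int) (b : Int) (out : Bool) : Decidable (Spec_solve a b out) := by
  unfold Spec_solve; infer_instance

-- ===== CLAIM (what is proved, stated in full; the proofs are below) =====
def Claim_equal_solve : Prop := ∀ (a : Int) (b : Int), Dom_solve a b → Pre_solve a b → Spec_solve a b (solve a b)

-- ===== LEMMAS AND PROOFS =====

theorem solve_comm (a b : Int) : solve a b = solve b a := by
  rw [solve, solve]
  simp only [min_comm, max_comm]

theorem go_flip (a b : Int) (hab : a ≤ b) (w : Bool) :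
    solveAltGo a b (! w) hab = ! solveAltGo a b w hab := by
  fun_induction solveAltGo a b w hab with
  | case1 a b win hab hm =>
      rw [solveAltGo, dif_pos hm]
  | case2 a b win hab hm h2 =>
      rw [solveAltGo, dif_neg hm, dif_pos h2]
  | case3 a b win hab hm h2 h1 =>
      rw [solveAltGo, dif_neg hm, dif_neg h2, dif_pos h1]
  | case4 a b win hab hm h2 h1 ih =>
      rw [solveAltGo, dif_neg hm, dif_neg h2, dif_neg h1, ih]

theorem loopA_true_iff (a b : Int) (hab : a ≤ b) (hm : PySem.Int.mod b a ≠ 0) :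
    ∀ (m : Nat) (j : Nat), (PySem.Int.floordiv b a - (j : Int)).toNat = m →
    (solveLoopA a b j hab hm = true ↔
      ∃ i : Int, (j : Int) < i ∧ i ≤ PySem.Int.floordiv b a ∧ solve a (b - a * i) = false) := by
  intro m
  induction m with
  | zero =>
    intro j hjm
    rw [solveLoopA, dif_neg (by omega)]
    simp only [Bool.false_eq_true, false_iff]
    rintro ⟨i, h1, h2, _⟩
    omega
  | succ m ih =>
    intro j hjm
    by_cases hj : ((j : Int) + 1) ≤ PySem.Int.floordiv b a
    · rw [solveLoopA, dif_pos hj]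
      cases hs : solve a (b - a * ((j : Int) + 1)) with
      | false =>
        simp only [Bool.not_false, if_true, true_iff]
        exact ⟨(j : Int) + 1, by omega, hj, hs⟩
      | true =>
        simp only [Bool.not_true, Bool.false_eq_true, if_false]
        rw [ih (j + 1) (by push_cast; omega)]
        constructor
        · rintro ⟨i, h1, h2, h3⟩
          exact ⟨i, by push_cast at h1 ⊢; omega, h2, h3⟩
        · rintro ⟨i, h1, h2, h3⟩
          refine ⟨i, ?_, h2, h3⟩
          push_cast at h1 ⊢
          rcases eq_or_lt_of_le (by omega : (j : Int) + 1 ≤ i) with h | h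
          · exfalso
            rw [← h] at h3
            rw [h3] at hs
            exact Bool.false_ne_true hs
          · omega
    · rw [solveLoopA, dif_neg hj]
      simp only [Bool.false_eq_true, false_iff]
      rintro ⟨i, h1, h2, _⟩
      omega

theorem mod_add_self (a r : Int) (ha : 0 < a) (h0 : 0 ≤ r) (hr : r < a) :
    PySem.Int.mod (r + a) a = r := by
  rw [PySem.Int.mod_eq_emod_of_pos ha]
  have : (r + a) % a = r % a := by
    have h := Int.add_mul_emod_self_left (a := r) (b := a) (c := 1)
    simp only [mul_one] at h
    exact h
  rw [this, Int.emod_eq_of_lt h0 hr]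

theorem fdiv_add_self (a r : Int) (ha : 0 < a) (h0 : 0 ≤ r) (hr : r < a) :
    PySem.Int.floordiv (r + a) a = 1 := by
  rw [PySem.Int.floordiv_eq_iff_of_pos ha]
  constructor <;> omega

-- main worker, positive sorted pairs: A's recursion equals B's loop started at win = true
theorem pv_main : ∀ (n : Nat) (a b : Int) (ha : 0 < a) (hab : a ≤ b),
    (a + b).toNat ≤ n → solve a b = solveAltGo a b true hab := by
  intro n
  induction n with
  | zero => intro a b ha hab hn; omega
  | succ n ih =>
    intro a b ha hab hn
    rw [solve]
    simp only [min_eq_left hab, max_eq_right hab]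
    by_cases hm : PySem.Int.mod b a = 0
    · rw [dif_pos hm, solveAltGo, dif_pos hm]
    · rw [dif_neg hm]
      have hk1 : 1 ≤ PySem.Int.floordiv b a := by
        rw [PySem.Int.le_floordiv_iff_mul_le ha]; omega
      set k := PySem.Int.floordiv b a with hkdef
      have hb := PySem.Int.floordiv_mul_add_mod b a
      rw [← hkdef] at hb
      set r := PySem.Int.mod b a with hrdef
      have hr0 : 0 ≤ r := PySem.Int.mod_nonneg b ha
      have hra : r < a := PySem.Int.mod_lt b ha
      by_cases hk2 : 2 ≤ k
      · -- ratio ≥ 2: B returns true at once; A's loop finds a losing reply at i = k-1 or i = k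
        have hka : 2 * a ≤ k * a := by nlinarith
        rw [solveAltGo, dif_neg hm, dif_pos (by rw [← hkdef]; omega)]
        refine (loopA_true_iff a b hab hm _ 0 rfl).mpr ?_
        have hrpos : 0 < r := by
          rcases lt_or_eq_of_le hr0 with h | h
          · exact h
          · exact absurd h.symm hm
        have e1 : solve a (b - a * k) = solveAltGo r a true (le_of_lt hra) := by
          have hx : b - a * k = r := by nlinarith
          rw [hx, solve_comm]
          exact ih r a hrpos (le_of_lt hra) (by omega)
        have e2 : solve a (b - a * (k - 1)) = ! solveAltGo r a true (le_of_lt hra) := by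
          have hx : b - a * (k - 1) = r + a := by
            have : a * (k - 1) = k * a - a := by ring
            omega
          rw [hx]
          have hs : a ≤ r + a := by omega
          have hsum : (a + (r + a)).toNat ≤ n := by omega
          rw [ih a (r + a) ha hs hsum, solveAltGo]
          rw [dif_neg (by rw [mod_add_self a r ha hr0 hra]; omega)]
          rw [dif_neg (by rw [fdiv_add_self a r ha hr0 hra]; omega)]
          rw [dif_neg (by rw [fdiv_add_self a r ha hr0 hra]; omega)]
          have hrw : r + a - a = r := by omega
          simp only [hrw]
          exact go_flip r a (le_of_lt hra) true
        cases hgo : solveAltGo r a true (le_of_lt hra)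
        · exact ⟨k, by omega, by omega, by rw [e1, hgo]⟩
        · exact ⟨k - 1, by omega, by omega, by rw [e2, hgo]; rfl⟩
      · -- ratio = 1: the move is forced for both
        have hk : k = 1 := by omega
        have hba : a < b := by
          rcases lt_or_eq_of_le hab with h | h
          · exact h
          · exfalso
            exact hm ((PySem.Int.mod_eq_zero_iff_dvd b a).mpr (h ▸ dvd_rfl))
        have hblt : b - a ≤ a := by
          have : k * a ≤ 1 * a := by nlinarith
          omega
        have hbpos : 0 < b - a := by omega
        have eA : solveLoopA a b 0 hab hm = ! solve a (b - a * 1) := by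
          cases hs : solve a (b - a * 1)
          · rw [Bool.not_false]
            exact (loopA_true_iff a b hab hm _ 0 rfl).mpr ⟨1, by omega, by omega, hs⟩
          · rw [Bool.not_true]
            by_contra hc
            simp only [Bool.not_eq_false] at hc
            obtain ⟨i, h1, h2, h3⟩ := (loopA_true_iff a b hab hm _ 0 rfl).mp hc
            have hi1 : i = 1 := by omega
            subst hi1
            rw [h3] at hs
            exact Bool.false_ne_true hs
        rw [eA]
        rw [solveAltGo, dif_neg hm, dif_neg (by rw [← hkdef]; omega),
            dif_neg (by rw [← hkdef]; omega)]
        rw [go_flip (b - a) a hblt true]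
        congr 1
        rw [show a * 1 = a from mul_one a, solve_comm]
        exact ih (b - a) a hbpos hblt (by omega)

-- negative smaller pile: A's loop is empty and B sees no legal move; both agree
theorem pv_neg : ∀ (a b : Int) (ha : a < 0) (hab : a ≤ b), solve a b = solveAltGo a b true hab := by
  intro a b ha hab
  rw [solve]
  simp only [min_eq_left hab, max_eq_right hab]
  by_cases hm : PySem.Int.mod b a = 0
  · rw [dif_pos hm, solveAltGo, dif_pos hm]
  · rw [dif_neg hm]
    have hng : ¬ 1 ≤ PySem.Int.floordiv b a := by
      intro h
      exact absurd (pvA_pos_of_guard a b hab hm h) (by omega)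
    rw [solveLoopA, dif_neg (by push_cast; omega)]
    rw [solveAltGo, dif_neg hm, dif_neg (by omega), dif_pos (by omega)]
    rfl

-- ===== VERDICT (by name: the statement is the Claim_ definition above) =====
theorem solve_spec : Claim_equal_solve := by
  intro a b _ hpre
  unfold Spec_solve solve_alt
  unfold Pre_solve at hpre
  rcases le_total a b with h | h
  · simp only [min_eq_left h, max_eq_right h] at hpre ⊢
    rcases lt_or_gt_of_ne hpre with ha | ha
    · exact pv_neg a b ha h
    · exact pv_main (a + b).toNat a b ha h (le_refl _)
  · simp only [min_eq_right h, max_eq_left h] at hpre ⊢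
    rw [solve_comm]
    rcases lt_or_gt_of_ne hpre with hb | hb
    · exact pv_neg b a hb h
    · exact pv_main (b + a).toNat b a hb h (le_refl _)
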